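-- pv_equiv track=rewrite | github.com/pk-hack/CoilSnake | coilsnake/model/eb/palettes.py | join_sets
-- ===== SOURCE A (Python) =====
-- def join_sets(sets, num_sets_to_output, set_length):
--     if len(sets) <= num_sets_to_output:
--         return sets
--
--     for i, set1 in enumerate(sets):
--         sets_in_order_of_shared_elements = [(len(set1.intersection(x)), j+i+1, x) for (j, x) in enumerate(sets[i+1:])]
--         sets_in_order_of_shared_elements.sort(reverse=True)
--         sets_in_order_of_shared_elements = [(j, x) for (_shared, j, x) in sets_in_order_of_shared_elements]
--         for j, set2 in sets_in_order_of_shared_elements: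
--             combined_set = set1.union(set2)
--             if len(combined_set) <= set_length:
--                 new_set_list = sets[:]
--                 new_set_list[i] = combined_set
--                 new_set_list.pop(j)
--                 result = join_sets(new_set_list, num_sets_to_output, set_length)
--                 if result is not None:
--                     return result
--
--     return None
-- ===== SOURCE B (Python) =====
-- def join_sets(sets, num_sets_to_output, set_length):
--     # Explicit-worklist preorder DFS instead of recursion; same visit order.
--     stack = [sets]
--     while stack:
--         state = stack.pop(0)
--         if len(state) <= num_sets_to_output:
--             return state
--         children = [state[:i] + [set1.union(set2)] + state[i + 1:j] + state[j + 1:]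
--                     for i, set1 in enumerate(state)
--                     for _shared, j, set2 in sorted(
--                         ((len(set1.intersection(x)), i + 1 + k, x)
--                          for k, x in enumerate(state[i + 1:])), reverse=True)
--                     if len(set1.union(set2)) <= set_length]
--         stack = children + stack
--     return None
-- ===== Notes on version B (the rewrite author's own statement) =====
-- stated objective: alternative
-- what changed: A's backtracking recursion is replaced by an explicit-worklist (stack of list-of-sets states) preorder depth-first search: each popped state is either returned (small enough) or expanded into all its valid merge children, which are prepended to the worklist in A's exploration order.
import Mathlib
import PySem

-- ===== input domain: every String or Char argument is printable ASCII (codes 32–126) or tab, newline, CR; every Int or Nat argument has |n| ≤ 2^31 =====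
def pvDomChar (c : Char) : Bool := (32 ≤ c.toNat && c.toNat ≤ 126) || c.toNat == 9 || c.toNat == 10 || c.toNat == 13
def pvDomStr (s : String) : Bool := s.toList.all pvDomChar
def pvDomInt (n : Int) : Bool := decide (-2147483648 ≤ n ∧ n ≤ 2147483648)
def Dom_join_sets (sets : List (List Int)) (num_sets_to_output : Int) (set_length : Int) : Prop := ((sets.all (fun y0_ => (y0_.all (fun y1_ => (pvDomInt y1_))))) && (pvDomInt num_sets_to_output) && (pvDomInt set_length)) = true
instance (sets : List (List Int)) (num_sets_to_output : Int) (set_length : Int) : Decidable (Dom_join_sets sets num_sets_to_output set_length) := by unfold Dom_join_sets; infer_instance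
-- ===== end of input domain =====

-- B rewrites A's backtracking recursion as an explicit-worklist preorder DFS (same visit order,
-- same first-found result); equivalence is about the return value only (neither mutates its input).

-- ===== PORT A =====

-- 'for … in xs: if f(x) is not None: return it' — a loop with an early return.
def pvFirstSome {α β : Type} : List α → (α → Option β) → Option β
  | [], _ => none
  | x :: xs, f =>
    match f x with
    | some r => some r
    | none => pvFirstSome xs f

-- The recursion of A, with a fuel argument only making the recursion structural: every
-- recursive call is on a list one shorter, so fuel = sets.length (as passed by join_sets)
-- is never exhausted before the Python returns (at fuel 0 the list is empty, and Python's
-- empty outer loop returns None exactly when the length test fails).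
def join_sets_go (num_sets_to_output set_length : Int) : Nat → List (List Int) → Option (List (List Int))
  | 0, sets =>
    if PySem.List.len sets ≤ num_sets_to_output then some sets
    else none
  | fuel' + 1, sets =>
    if PySem.List.len sets ≤ num_sets_to_output then some sets
    else
      pvFirstSome (PySem.List.enumerate sets) (fun p =>
        -- Python sorts the (shared, j, x) triples; the set x never decides the order
        -- because the index j is unique, so the sort is ported with the (shared, j) key.
        let ordered := PySem.List.sorted2
          ((PySem.List.enumerate (PySem.List.slice sets (some (p.1 + 1)) none)).map
            (fun q => (((PySem.Set.inter p.2 q.2).length : Int), (q.1 + p.1 + 1, q.2))))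
          (fun t => t.1) (fun t => t.2.1) true
        let pairs := ordered.map (fun t => t.2)
        pvFirstSome pairs (fun jq =>
          let combined := PySem.Set.union p.2 jq.2
          if PySem.List.len combined ≤ set_length then
            match PySem.List.pop? (PySem.List.pySetD sets p.1 combined) jq.1 with
            | some r => join_sets_go num_sets_to_output set_length fuel' r.2
            | none => none  -- unreachable: jq.1 is always in range
          else none))

def join_sets (sets : List (List Int)) (num_sets_to_output : Int) (set_length : Int) : Option (List (List Int)) :=
  join_sets_go num_sets_to_output set_length sets.length sets

-- ===== PORT B =====

-- the child states of one worklist state, in A's preorder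
def pvChildren (state : List (List Int)) (set_length : Int) : List (List (List Int)) :=
  (PySem.List.enumerate state).flatMap (fun p =>
    (PySem.List.sorted2
      ((PySem.List.enumerate (PySem.List.slice state (some (p.1 + 1)) none)).map
        (fun q => (((PySem.Set.inter p.2 q.2).length : Int), (p.1 + 1 + q.1, q.2))))
      (fun t => t.1) (fun t => t.2.1) true).filterMap (fun t =>
        if PySem.List.len (PySem.Set.union p.2 t.2.2) ≤ set_length then
          some (PySem.List.slice state none (some p.1) ++ [PySem.Set.union p.2 t.2.2]
                ++ PySem.List.slice state (some (p.1 + 1)) (some t.2.1)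
                ++ PySem.List.slice state (some (t.2.1 + 1)) none)
        else none))

-- fuel for the worklist loop: a bound on the number of pops, only making the loop
-- structural (each pop removes a state of weight pvW(len) and adds at most len^2
-- children of weight pvW(len-1) each, so the total weight strictly decreases)
def pvW : Nat → Nat
  | 0 => 1
  | n + 1 => 1 + (n + 1) * (n + 1) * pvW n

def pvStackW (st : List (List (List Int))) : Nat := (st.map (fun s => pvW s.length)).sum

def join_sets_loop (num_sets_to_output set_length : Int) : Nat → List (List (List Int)) → Option (List (List Int))
  | _, [] => none
  | 0, _ :: _ => none  -- unreachable: the fuel passed by join_sets_alt bounds the pop count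
  | fuel + 1, state :: rest =>
    if PySem.List.len state ≤ num_sets_to_output then some state
    else join_sets_loop num_sets_to_output set_length fuel (pvChildren state set_length ++ rest)

def join_sets_alt (sets : List (List Int)) (num_sets_to_output : Int) (set_length : Int) : Option (List (List Int)) :=
  join_sets_loop num_sets_to_output set_length (pvStackW [sets] + 1) [sets]

-- ===== PRECONDITION & SPEC =====
def Spec_join_sets (sets : List (List Int)) (num_sets_to_output : Int) (set_length : Int) (out : Option (List (List Int))) : Prop := out = join_sets_alt sets num_sets_to_output set_length
instance (sets : List (List Int)) (num_sets_to_output : Int) (set_length : Int) (out : Option (List (List Int))) : Decidable (Spec_join_sets sets num_sets_to_output set_length out) := by unfold Spec_join_sets; infer_instance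

-- ===== CLAIM (what is proved, stated in full; the proofs are below) =====
def Claim_equal_join_sets : Prop := ∀ (sets : List (List Int)) (num_sets_to_output : Int) (set_length : Int), Dom_join_sets sets num_sets_to_output set_length → Spec_join_sets sets num_sets_to_output set_length (join_sets sets num_sets_to_output set_length)

-- ===== LEMMAS AND PROOFS =====
lemma pvChildren_length_le (state : List (List Int)) (q : Int) :
    (pvChildren state q).length ≤ state.length * state.length := by
  unfold pvChildren
  rw [List.length_flatMap]
  have hcard := List.sum_le_card_nsmul
    ((PySem.List.enumerate state).map fun p =>
      ((PySem.List.sorted2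
        ((PySem.List.enumerate (PySem.List.slice state (some (p.1 + 1)) none)).map
          (fun q' => (((PySem.Set.inter p.2 q'.2).length : Int), (p.1 + 1 + q'.1, q'.2))))
        (fun t => t.1) (fun t => t.2.1) true).filterMap (fun t =>
          if PySem.List.len (PySem.Set.union p.2 t.2.2) ≤ q then
            some (PySem.List.slice state none (some p.1) ++ [PySem.Set.union p.2 t.2.2]
                  ++ PySem.List.slice state (some (p.1 + 1)) (some t.2.1)
                  ++ PySem.List.slice state (some (t.2.1 + 1)) none)
          else none)).length)
    state.length ?_
  · simpa [PySem.List.length_enumerate, smul_eq_mul] using hcard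
  · intro x hx
    obtain ⟨p, hp, rfl⟩ := List.mem_map.mp hx
    calc _ ≤ (PySem.List.sorted2
        ((PySem.List.enumerate (PySem.List.slice state (some (p.1 + 1)) none)).map
          (fun q' => (((PySem.Set.inter p.2 q'.2).length : Int), (p.1 + 1 + q'.1, q'.2))))
        (fun t => t.1) (fun t => t.2.1) true).length := List.length_filterMap_le _ _
      _ = _ := (PySem.List.sorted2_perm _ _ _ _).length_eq
      _ ≤ state.length := by
          rw [List.length_map, PySem.List.length_enumerate, PySem.List.slice_some_none]
          simp [List.length_drop]

lemma pvChildren_mem_length {state : List (List Int)} {q : Int} {c : List (List Int)}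
    (h : c ∈ pvChildren state q) : c.length + 1 = state.length := by
  unfold pvChildren at h
  obtain ⟨p, hp, hc⟩ := List.mem_flatMap.mp h
  obtain ⟨t, ht, hct⟩ := List.mem_filterMap.mp hc
  obtain ⟨i, hi, rfl⟩ := (PySem.List.mem_enumerate_iff _ _ _).mp hp
  have ht' := ((PySem.List.sorted2_perm _ _ _ _).mem_iff).mp ht
  obtain ⟨q', hq', rfl⟩ := List.mem_map.mp ht'
  obtain ⟨k, hk, rfl⟩ := (PySem.List.mem_enumerate_iff _ _ _).mp hq'
  have hk' : k < state.length - (i + 1) := by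
    rw [PySem.List.slice_some_none] at hk
    simp only [List.length_drop] at hk
    have hcl : PySem.List.clampIdx state.length ((0 : Int) + (i : Int) + 1) = i + 1 := by
      have : ((0 : Int) + (i : Int) + 1) = ((i + 1 : Nat) : Int) := by push_cast; omega
      rw [this, PySem.List.clampIdx_natCast]
      omega
    omega
  split at hct
  · have hc' := (Option.some_inj.mp hct)
    rw [← hc']
    have e2 : ((i : Int) + 1) = ((i + 1 : Nat) : Int) := by push_cast; ring
    have e3 : ((i : Int) + 1 + (k : Int)) = ((i + 1 + k : Nat) : Int) := by push_cast; ring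
    have e4 : ((i : Int) + 1 + (k : Int) + 1) = ((i + 1 + k + 1 : Nat) : Int) := by push_cast; ring
    simp only [zero_add]
    simp only [e4]
    simp only [e3]
    simp only [e2]
    rw [PySem.List.slice_to_natCast, PySem.List.slice_natCast,
        PySem.List.slice_from_natCast state (i + 1 + k + 1)]
    simp only [List.length_append, List.length_take, List.length_drop,
      List.length_cons, List.length_nil]
    omega
  · exact absurd hct (by simp)

lemma pvStackW_append (a b : List (List (List Int))) :
    pvStackW (a ++ b) = pvStackW a + pvStackW b := by
  simp [pvStackW]

lemma pvW_pos (n : Nat) : 1 ≤ pvW n := by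
  cases n <;> simp [pvW]

lemma pvStackW_dec (state : List (List Int)) (q : Int) (rest : List (List (List Int))) :
    pvStackW (pvChildren state q ++ rest) < pvStackW (state :: rest) := by
  rw [pvStackW_append]
  have hstep : pvStackW (pvChildren state q) < pvW state.length := by
    cases state with
    | nil =>
      have : pvChildren [] q = [] := by unfold pvChildren; simp [PySem.List.enumerate]
      simp [this, pvStackW, pvW]
    | cons s ss =>
      have hlen : ∀ c ∈ pvChildren (s :: ss) q, c.length = ss.length := by
        intro c hc
        have := pvChildren_mem_length hc
        simp at this
        omega
      have hsum := List.sum_le_card_nsmul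
        ((pvChildren (s :: ss) q).map fun c => pvW c.length) (pvW ss.length) ?_
      · have hcnt : (pvChildren (s :: ss) q).length ≤ (ss.length + 1) * (ss.length + 1) := by
          have := pvChildren_length_le (s :: ss) q
          simpa using this
        have hb : pvStackW (pvChildren (s :: ss) q) ≤ (ss.length + 1) * (ss.length + 1) * pvW ss.length := by
          rw [pvStackW]
          calc _ ≤ ((pvChildren (s :: ss) q).map fun c => pvW c.length).length • pvW ss.length := hsum
            _ = (pvChildren (s :: ss) q).length * pvW ss.length := by simp [smul_eq_mul]
            _ ≤ _ := Nat.mul_le_mul_right _ hcnt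
        calc pvStackW (pvChildren (s :: ss) q) ≤ _ := hb
          _ < pvW (s :: ss).length := by simp only [List.length_cons, pvW]; omega
      · intro x hx
        obtain ⟨c, hc, rfl⟩ := List.mem_map.mp hx
        rw [hlen c hc]
  have : pvStackW (state :: rest) = pvW state.length + pvStackW rest := by simp [pvStackW]
  omega


lemma pvFirstSome_append {α β : Type} (xs ys : List α) (f : α → Option β) :
    pvFirstSome (xs ++ ys) f =
      match pvFirstSome xs f with
      | some r => some r
      | none => pvFirstSome ys f := by
  induction xs with
  | nil => simp [pvFirstSome]
  | cons x xs ih =>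
    simp only [List.cons_append, pvFirstSome]
    cases f x <;> simp [ih]

lemma pvFirstSome_flatMap {α β γ : Type} (xs : List α) (g : α → List β) (f : β → Option γ) :
    pvFirstSome (xs.flatMap g) f = pvFirstSome xs (fun x => pvFirstSome (g x) f) := by
  induction xs with
  | nil => simp [pvFirstSome]
  | cons x xs ih =>
    simp only [List.flatMap_cons, pvFirstSome_append, pvFirstSome]
    cases pvFirstSome (g x) f <;> simp [ih]

lemma pvFirstSome_filterMap {α β γ : Type} (xs : List α) (g : α → Option β) (f : β → Option γ) :
    pvFirstSome (xs.filterMap g) f = pvFirstSome xs (fun x => (g x).bind f) := by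
  induction xs with
  | nil => simp [pvFirstSome]
  | cons x xs ih =>
    cases hx : g x with
    | none => simp [hx, pvFirstSome, ih]
    | some y =>
      simp only [List.filterMap_cons, hx, pvFirstSome, Option.bind_some]
      cases f y <;> simp [ih]

lemma pvFirstSome_map {α β γ : Type} (xs : List α) (g : α → β) (f : β → Option γ) :
    pvFirstSome (xs.map g) f = pvFirstSome xs (fun x => f (g x)) := by
  induction xs with
  | nil => simp [pvFirstSome]
  | cons x xs ih =>
    simp only [List.map_cons, pvFirstSome]
    cases f (g x) <;> simp [ih]

lemma pvFirstSome_congr {α β : Type} {xs : List α} {f g : α → Option β}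
    (h : ∀ x ∈ xs, f x = g x) : pvFirstSome xs f = pvFirstSome xs g := by
  induction xs with
  | nil => rfl
  | cons x xs ih =>
    simp only [pvFirstSome, h x (by simp)]
    cases g x <;> simp [ih fun y hy => h y (by simp [hy])]

-- the one list identity the two child constructions differ by
lemma pvChildEq (state : List (List Int)) (comb : List Int) (i k : Nat)
    (h : i + 1 + k < state.length) :
    (state.set i comb).eraseIdx (i + 1 + k) =
      state.take i ++ comb :: ((state.drop (i + 1)).take k ++ state.drop (i + 1 + k + 1)) := by
  rw [List.set_eq_take_cons_drop comb (by omega), List.eraseIdx_eq_take_drop_succ]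
  rw [List.take_append, List.drop_append]
  have hti : (state.take i).length = i := by simp; omega
  rw [hti]
  have h1 : i + 1 + k - i = k + 1 := by omega
  have h2 : i + 1 + k + 1 - i = k + 2 := by omega
  rw [h1, h2]
  rw [List.take_of_length_le (l := state.take i) (by rw [hti]; omega),
      List.drop_of_length_le (l := state.take i) (by rw [hti]; omega)]
  show state.take i ++ (comb :: state.drop (i+1)).take (k+1) ++ ([] ++ (comb :: state.drop (i+1)).drop (k+2)) = _
  simp only [List.take_succ_cons, List.drop_succ_cons, List.nil_append, List.append_assoc, List.cons_append]
  congr 2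
  rw [List.drop_drop]
  have h3 : i + 1 + (k + 1) = i + 1 + k + 1 := by omega
  rw [h3]

-- A's recursion (at fuel = state.length) computes exactly the worklist step
lemma pvLoop_mono (num_sets_to_output set_length : Int) :
    ∀ (f : Nat) (g : Nat) (st : List (List (List Int))),
      pvStackW st < f → pvStackW st < g →
      join_sets_loop num_sets_to_output set_length f st =
        join_sets_loop num_sets_to_output set_length g st := by
  intro f
  induction f with
  | zero => intro g st hf _; omega
  | succ f ih =>
    intro g st hf hg
    cases st with
    | nil => cases g with
      | zero => rfl
      | succ g => rfl
    | cons state rest =>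
      cases g with
      | zero =>
        exfalso
        simp [pvStackW] at hg
      | succ g =>
        simp only [join_sets_loop]
        split
        · rfl
        · exact ih g _ (by have := pvStackW_dec state set_length rest; omega)
            (by have := pvStackW_dec state set_length rest; omega)

-- A's recursion (at fuel = state.length) computes exactly one worklist step
lemma pvLoop_cons (num_sets_to_output set_length : Int) :
    ∀ (n : Nat) (state : List (List Int)) (rest : List (List (List Int))) (f : Nat),
      pvStackW (state :: rest) ≤ n → n < f →
      join_sets_loop num_sets_to_output set_length f (state :: rest) =
        match join_sets_go num_sets_to_output set_length state.length state with
        | some r => some r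
        | none => join_sets_loop num_sets_to_output set_length f rest := by
  intro n
  induction n using Nat.strong_induction_on with
  | _ n IH =>
  intro state rest f hle hf
  obtain ⟨f, rfl⟩ : ∃ f', f = f' + 1 := ⟨f - 1, by omega⟩
  have hrest : pvStackW rest < f := by
    have := pvW_pos state.length
    simp only [pvStackW, List.map_cons, List.sum_cons] at hle ⊢
    omega
  cases state with
  | nil =>
    simp only [join_sets_loop]
    by_cases hnum : PySem.List.len ([] : List (List Int)) ≤ num_sets_to_output
    all_goals simp only [PySem.List.len_eq, List.length_nil, Nat.cast_zero] at hnum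
    · simp [join_sets_go, hnum]
    · have hch : pvChildren [] set_length = [] := by
        unfold pvChildren; simp [PySem.List.enumerate]
      simp [join_sets_go, hnum, hch]
      exact pvLoop_mono num_sets_to_output set_length f (f + 1) rest hrest (by omega)
  | cons s ss =>
    simp only [join_sets_loop]
    by_cases hnum : PySem.List.len (s :: ss) ≤ num_sets_to_output
    · rw [if_pos hnum]
      rw [show (s :: ss).length = ss.length + 1 from rfl, join_sets_go, if_pos hnum]
    · rw [if_neg hnum]
      have sub : ∀ cs : List (List (List Int)), (∀ c ∈ cs, c.length = ss.length) →
          ∀ rest' : List (List (List Int)), pvStackW (cs ++ rest') < n →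
          join_sets_loop num_sets_to_output set_length f (cs ++ rest') =
            match pvFirstSome cs (fun c => join_sets_go num_sets_to_output set_length ss.length c) with
            | some r => some r
            | none => join_sets_loop num_sets_to_output set_length f rest' := by
        intro cs
        induction cs with
        | nil => intro _ rest' _; simp [pvFirstSome]
        | cons c cs ih =>
          intro hlen rest' hw
          rw [List.cons_append]
          have h1 := IH (pvStackW (c :: (cs ++ rest'))) (by simpa [List.cons_append] using hw)
            c (cs ++ rest') f le_rfl (by simp only [List.cons_append] at hw ⊢; omega)
          rw [hlen c List.mem_cons_self] at h1
          rw [h1]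
          cases hgo : join_sets_go num_sets_to_output set_length ss.length c with
          | some r => simp [pvFirstSome, hgo]
          | none =>
            simp only [pvFirstSome, hgo]
            exact ih (fun x hx => hlen x (List.mem_cons_of_mem _ hx)) rest'
              (lt_of_le_of_lt (by simp [pvStackW]) hw)
      have hchild : ∀ c ∈ pvChildren (s :: ss) set_length, c.length = ss.length := by
        intro c hc
        have := pvChildren_mem_length hc
        simp at this
        omega
      have hwlt : pvStackW (pvChildren (s :: ss) set_length ++ rest) < n :=
        lt_of_lt_of_le (pvStackW_dec (s :: ss) set_length rest) hle
      rw [sub _ hchild rest hwlt]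
      have key : pvFirstSome (pvChildren (s :: ss) set_length)
            (fun c => join_sets_go num_sets_to_output set_length ss.length c) =
          join_sets_go num_sets_to_output set_length (s :: ss).length (s :: ss) := by
        rw [show (s :: ss).length = ss.length + 1 from rfl, join_sets_go, if_neg hnum]
        show _ = pvFirstSome (PySem.List.enumerate (s :: ss)) _
        unfold pvChildren
        rw [pvFirstSome_flatMap]
        apply pvFirstSome_congr
        intro p hp
        obtain ⟨i, hi, rfl⟩ := (PySem.List.mem_enumerate_iff _ _ _).mp hp
        rw [pvFirstSome_filterMap, pvFirstSome_map]
        have etrip : (fun q : Int × List Int =>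
              (((PySem.Set.inter ((0 : Int) + (i : Int), (s :: ss)[i]).2 q.2).length : Int),
                (((0 : Int) + (i : Int), (s :: ss)[i]).1 + 1 + q.1, q.2))) =
            (fun q : Int × List Int =>
              (((PySem.Set.inter ((0 : Int) + (i : Int), (s :: ss)[i]).2 q.2).length : Int),
                (q.1 + ((0 : Int) + (i : Int), (s :: ss)[i]).1 + 1, q.2))) := by
          funext q'
          simp only [Prod.mk.injEq, true_and]
          constructor
          · ring
          · trivial
        rw [etrip]
        apply pvFirstSome_congr
        intro t ht
        have ht' := ((PySem.List.sorted2_perm _ _ _ _).mem_iff).mp ht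
        obtain ⟨q', hq', rfl⟩ := List.mem_map.mp ht'
        obtain ⟨k, hk, rfl⟩ := (PySem.List.mem_enumerate_iff _ _ _).mp hq'
        have hk' : k < (s :: ss).length - (i + 1) := by
          rw [PySem.List.slice_some_none] at hk
          simp only [List.length_drop] at hk
          have hcl : PySem.List.clampIdx (s :: ss).length ((0 : Int) + (i : Int) + 1) = i + 1 := by
            have e0 : ((0 : Int) + (i : Int) + 1) = ((i + 1 : Nat) : Int) := by push_cast; omega
            rw [e0, PySem.List.clampIdx_natCast]
            simp only [List.length_cons] at hi ⊢
            omega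
          omega
        simp only [zero_add]
        split_ifs with hfit
        · rw [Option.bind_some]
          have e3 : ((k : Int) + (i : Int) + 1) = ((i + 1 + k : Nat) : Int) := by push_cast; ring
          have e4 : ((k : Int) + (i : Int) + 1 + 1) = ((i + 1 + k + 1 : Nat) : Int) := by push_cast; ring
          rw [e4, e3, PySem.List.pySetD_natCast,
              PySem.List.pop?_natCast _ _ (by simp only [List.length_set]; omega)]
          refine congrArg (join_sets_go num_sets_to_output set_length ss.length) ?_
          rw [pvChildEq (s :: ss) _ i k (by omega)]
          have e2 : ((i : Int) + 1) = ((i + 1 : Nat) : Int) := by push_cast; ring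
          simp only [e2]
          rw [PySem.List.slice_to_natCast, PySem.List.slice_natCast,
              PySem.List.slice_from_natCast (s :: ss) (i + 1 + k + 1)]
          have e5 : i + 1 + k - (i + 1) = k := by omega
          rw [e5]
          simp [List.append_assoc]
        · simp
      rw [key]
      cases hgo : join_sets_go num_sets_to_output set_length (s :: ss).length (s :: ss) with
      | some r => simp
      | none =>
        simp only
        exact pvLoop_mono num_sets_to_output set_length f (f + 1) rest hrest (by omega)

-- ===== VERDICT (by name: the statement is the Claim_ definition above) =====
theorem join_sets_spec : Claim_equal_join_sets := by
  intro sets num_sets_to_output set_length _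
  unfold Spec_join_sets join_sets join_sets_alt
  rw [pvLoop_cons num_sets_to_output set_length (pvStackW [sets]) sets []
      (pvStackW [sets] + 1) le_rfl (by omega)]
  cases join_sets_go num_sets_to_output set_length sets.length sets <;>
    simp [join_sets_loop]
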